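-- pv_equiv track=rewrite | github.com/dgsdhsd/social-conformity | 最终文件目录/5_4.1时间序列图_一致性.py | find_c_segments
-- ===== SOURCE A (Python) =====
-- def find_c_segments(sequence):
--     """
--     Finds continuous segments in a sequence where all elements contain 'C'.
--     Returns a list of tuples (start_index, end_index) for each segment.
--
--     :param sequence: List of strings
--     :return: List of tuples with start and end indices
--     """
--     segments = []
--     start = None  # Track the start of a segment
--
--     for i, element in enumerate(sequence):
--         if 'C' in element:
--             if start is None:  # Start of a new segment
--                 start = i
--         else:
--             if start is not None:  # End of a segment
--                 segments.append((start, i - 1))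
--                 start = None
--
--     # Add the last segment if the sequence ends with a 'C' segment
--     if start is not None:
--         segments.append((start, len(sequence) - 1))
--
--     return segments
-- ===== SOURCE B (Python) =====
-- def find_c_segments(sequence):
--     """
--     Finds continuous segments in a sequence where all elements contain 'C'.
--     Two-pass version: first collect all matching indices, then coalesce
--     maximal runs of consecutive indices into (start, end) tuples.
--     """
--     idxs = [i for i, element in enumerate(sequence) if 'C' in element]
--     if not idxs:
--         return []
--     segments = []
--     start = prev = idxs[0]
--     for j in idxs[1:]:
--         if j == prev + 1:
--             prev = j
--         else:
--             segments.append((start, prev))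
--             start = prev = j
--     segments.append((start, prev))
--     return segments
-- ===== Notes on version B (the rewrite author's own statement) =====
-- stated objective: alternative
-- what changed: Replaces A's single-pass loop with a start/None sentinel by a two-pass structure: first build the list of all indices whose element contains 'C', then coalesce maximal runs of consecutive indices into (start, end) pairs.
import Mathlib
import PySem

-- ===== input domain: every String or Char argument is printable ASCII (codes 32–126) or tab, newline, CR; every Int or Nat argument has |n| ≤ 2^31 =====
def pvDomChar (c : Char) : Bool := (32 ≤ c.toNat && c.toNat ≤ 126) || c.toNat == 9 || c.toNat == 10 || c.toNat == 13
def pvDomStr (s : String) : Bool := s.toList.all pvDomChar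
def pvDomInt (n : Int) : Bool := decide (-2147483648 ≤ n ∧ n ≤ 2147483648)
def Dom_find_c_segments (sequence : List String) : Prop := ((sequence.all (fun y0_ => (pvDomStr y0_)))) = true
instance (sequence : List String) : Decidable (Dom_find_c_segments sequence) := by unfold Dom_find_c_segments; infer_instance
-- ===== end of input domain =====

-- B replaces A's sentinel loop by a two-pass structure (collect matching indices, then
-- coalesce consecutive runs); same O(n) cost, alternative decomposition.


-- ===== PORT A =====
-- A's for-loop over enumerate(sequence) with state (segments, start), written as the
-- obvious structural recursion over the list with an explicit index counter.
def pvLoopA (i : Int) (start : Option Int) (segs : List (Int × Int)) :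
    List String → List (Int × Int)
  | [] =>
      -- after the loop: add the last segment if still open (i = len(sequence))
      match start with
      | none => segs
      | some s => segs ++ [(s, i - 1)]
  | x :: xs =>
      if PySem.Str.isIn "C" x then
        match start with
        | none => pvLoopA (i + 1) (some i) segs xs
        | some s => pvLoopA (i + 1) (some s) segs xs
      else
        match start with
        | none => pvLoopA (i + 1) none segs xs
        | some s => pvLoopA (i + 1) none (segs ++ [(s, i - 1)]) xs

def find_c_segments (sequence : List String) : List (Int × Int) :=
  pvLoopA 0 none [] sequence

-- ===== PORT B =====
-- pass 1: [i for i, element in enumerate(sequence) if 'C' in element]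
def pvIdxs (i : Int) : List String → List Int
  | [] => []
  | x :: xs => if PySem.Str.isIn "C" x then i :: pvIdxs (i + 1) xs else pvIdxs (i + 1) xs

-- pass 2: the for-loop over idxs[1:] with state (segments, start, prev)
def pvGo (start prev : Int) (segs : List (Int × Int)) : List Int → List (Int × Int)
  | [] => segs ++ [(start, prev)]
  | j :: js =>
      if j = prev + 1 then pvGo start j segs js
      else pvGo j j (segs ++ [(start, prev)]) js

def find_c_segments_alt (sequence : List String) : List (Int × Int) :=
  match pvIdxs 0 sequence with
  | [] => []
  | j :: js => pvGo j j [] js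

-- ===== PRECONDITION & SPEC =====
def Spec_find_c_segments (sequence : List String) (out : List (Int × Int)) : Prop := out = find_c_segments_alt sequence
instance (sequence : List String) (out : List (Int × Int)) : Decidable (Spec_find_c_segments sequence out) := by unfold Spec_find_c_segments; infer_instance

-- ===== CLAIM (what is proved, stated in full; the proofs are below) =====
def Claim_equal_find_c_segments : Prop := ∀ (sequence : List String), Dom_find_c_segments sequence → Spec_find_c_segments sequence (find_c_segments sequence)

-- ===== LEMMAS AND PROOFS =====

-- every index produced by pvIdxs i is ≥ i
theorem pvIdxs_ge (xs : List String) : ∀ (i j : Int), j ∈ pvIdxs i xs → i ≤ j := by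
  induction xs with
  | nil => intro i j h; simp [pvIdxs] at h
  | cons x xs ih =>
      intro i j h
      simp only [pvIdxs] at h
      split at h
      · rcases List.mem_cons.mp h with h | h
        · omega
        · have := ih (i + 1) j h; omega
      · have := ih (i + 1) j h; omega

-- the coalescing loop only appends to its accumulator
theorem pvGo_append (js : List Int) : ∀ (s p : Int) (a b : List (Int × Int)),
    pvGo s p (a ++ b) js = a ++ pvGo s p b js := by
  induction js with
  | nil => intro s p a b; simp [pvGo]
  | cons j js ih =>
      intro s p a b
      simp only [pvGo]
      split
      · exact ih s j a b
      · rw [List.append_assoc, ih]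

-- main invariant: A's loop, in either state, equals B's coalescing of the remaining indices
theorem pvMain (xs : List String) :
    (∀ (i : Int) (segs : List (Int × Int)),
        pvLoopA i none segs xs =
          segs ++ (match pvIdxs i xs with | [] => [] | j :: js => pvGo j j [] js)) ∧
    (∀ (i s : Int) (segs : List (Int × Int)),
        pvLoopA i (some s) segs xs = pvGo s (i - 1) segs (pvIdxs i xs)) := by
  induction xs with
  | nil =>
      constructor
      · intro i segs; simp [pvLoopA, pvIdxs]
      · intro i s segs; simp [pvLoopA, pvIdxs, pvGo]
  | cons x xs ih =>
      obtain ⟨ih1, ih2⟩ := ih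
      constructor
      · intro i segs
        simp only [pvLoopA, pvIdxs]
        split
        · -- 'C' in x : segment opens at i
          rw [ih2 (i + 1) i segs]
          rw [show (i + 1 - 1) = i by omega]
          rw [show segs = segs ++ ([] : List (Int × Int)) by simp]
          rw [pvGo_append]
          simp
        · exact ih1 (i + 1) segs
      · intro i s segs
        simp only [pvLoopA, pvIdxs]
        split
        · -- 'C' in x : run continues
          rw [ih2 (i + 1) s segs]
          simp only [pvGo]
          rw [if_pos (show i = i - 1 + 1 by omega)]
          congr 1
          omega
        · -- not in x : segment (s, i-1) closes
          rw [ih1 (i + 1) (segs ++ [(s, i - 1)])]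
          cases hidx : pvIdxs (i + 1) xs with
          | nil => simp [pvGo]
          | cons j js =>
              have hj : i + 1 ≤ j := pvIdxs_ge xs (i + 1) j (by rw [hidx]; exact List.mem_cons_self ..)
              simp only [pvGo]
              rw [if_neg (by omega)]
              rw [show segs ++ [(s, i - 1)] = segs ++ [(s, i - 1)] ++ ([] : List (Int × Int)) by simp]
              rw [pvGo_append]
              simp

-- ===== VERDICT (by name: the statement is the Claim_ definition above) =====
theorem find_c_segments_spec : Claim_equal_find_c_segments := by
  intro sequence _
  unfold Spec_find_c_segments find_c_segments find_c_segments_alt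
  rw [(pvMain sequence).1 0 []]
  simp
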